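-- pv_equiv track=rewrite | github.com/rpc-star/Learning-Project | tutorial if.py | find_world
-- ===== SOURCE A (Python) =====
-- def find_world(f, word):
--     g_indx = 0
--     for line in f:
--         indx = 0
--         while (indx != -1):
--             indx = line.find(word, indx)
--             if indx > -1:
--                 yield g_indx + indx
--                 indx += 1
--
--         g_indx += len(line)
-- ===== SOURCE B (Python) =====
-- def find_world(f, word):
--     g_indx = 0
--     for line in f:
--         n = len(line)
--         for i in range(n + 1):
--             if line[i:].startswith(word):
--                 yield g_indx + i
--         g_indx += n
-- ===== Notes on version B (the rewrite author's own statement) =====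
-- stated objective: alternative
-- what changed: The inner while/str.find jump-to-next-match loop is replaced by an exhaustive positional scan that tests line[i:].startswith(word) at every offset 0..len(line).
import Mathlib
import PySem

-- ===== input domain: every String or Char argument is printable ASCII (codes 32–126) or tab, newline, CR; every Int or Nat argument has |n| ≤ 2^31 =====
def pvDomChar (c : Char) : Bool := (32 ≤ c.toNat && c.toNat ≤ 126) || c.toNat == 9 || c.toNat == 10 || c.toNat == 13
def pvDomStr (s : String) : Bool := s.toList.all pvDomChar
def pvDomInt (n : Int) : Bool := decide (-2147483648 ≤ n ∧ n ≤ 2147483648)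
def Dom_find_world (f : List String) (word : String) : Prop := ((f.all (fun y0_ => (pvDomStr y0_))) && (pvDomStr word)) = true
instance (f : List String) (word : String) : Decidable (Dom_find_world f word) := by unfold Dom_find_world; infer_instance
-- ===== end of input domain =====

-- B replaces A's inner while/str.find jump-to-next-match loop by an exhaustive positional
-- scan testing a match at every offset (alternative decomposition; same return value).
-- Both Pythons are generators; equivalence is about the yielded sequence read as a list.

-- ===== PORT A =====
-- termination fact for A's while-loop: str.find(word, start) is -1 once start passes len
theorem pvFindFrom_past_len (s sub : List Char) (k : Nat) (h : s.length < k) :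
    PySem.Chars.findFrom s sub (k : Int) none = -1 := by
  simp [PySem.Chars.findFrom]; omega

-- A's inner 'while indx != -1' loop. indx only ever holds 0 or (a found index)+1, both
-- naturals, so it is carried as a Nat; the final iteration with indx = -1 does nothing
-- and is folded into the 'else' branch.
def findLoopA (line word : String) (g : Int) (indx : Nat) : List Int :=
  let j := PySem.Str.findFrom line word (indx : Int) none
  if h : j > -1 then (g + j) :: findLoopA line word g (j.toNat + 1)
  else []
termination_by line.toList.length + 1 - indx
decreasing_by
  simp only [j, PySem.Str.findFrom_eq] at h ⊢
  by_cases hk : indx ≤ line.toList.length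
  · have := (PySem.Chars.findFrom_natCast_spec line.toList word.toList indx hk (by omega)).1
    omega
  · rw [pvFindFrom_past_len line.toList word.toList indx (by omega)] at h
    omega

def find_world (f : List String) (word : String) : List Int :=
  (f.foldl (fun st line => (st.1 ++ findLoopA line word st.2 0, st.2 + PySem.Str.len line))
    (([] : List Int), (0 : Int))).1

-- ===== PORT B =====
-- B's inner 'for i in range(n + 1): if line[i:].startswith(word): yield g_indx + i'
def scanLineB (line word : String) (g : Int) : List Int :=
  (PySem.List.pyRange 0 (PySem.Str.len line + 1) 1).foldl
    (fun acc i =>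
      if PySem.Str.startswith (PySem.Str.slice line (some i) none) word then acc ++ [g + i]
      else acc) []

def find_world_alt (f : List String) (word : String) : List Int :=
  (f.foldl (fun st line => (st.1 ++ scanLineB line word st.2, st.2 + PySem.Str.len line))
    (([] : List Int), (0 : Int))).1

-- ===== PRECONDITION & SPEC =====
def Spec_find_world (f : List String) (word : String) (out : List Int) : Prop := out = find_world_alt f word
instance (f : List String) (word : String) (out : List Int) : Decidable (Spec_find_world f word out) := by unfold Spec_find_world; infer_instance

-- ===== CLAIM (what is proved, stated in full; the proofs are below) =====
def Claim_equal_find_world : Prop := ∀ (f : List String) (word : String), Dom_find_world f word → Spec_find_world f word (find_world f word)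

-- ===== LEMMAS AND PROOFS =====

-- common characterisation: the match positions in s from offset k on, as yielded values
def pvOcc (s w : List Char) (g : Int) (k : Nat) : List Int :=
  ((List.range' k (s.length + 1 - k)).filter (fun i => decide (w <+: s.drop i))).map
    (fun (i : Nat) => g + Int.ofNat i)

theorem pvNoPrefix_of_not_infix {s w : List Char} {k : Nat}
    (h : ¬ w <:+: s.drop k) : ∀ i, k ≤ i → ¬ w <+: s.drop i := by
  intro i hki hp
  apply h
  rw [← PySem.Chars.isIn_iff_infix, ← PySem.Chars.exists_prefix_drop_iff_isIn]
  exact ⟨i - k, by rw [List.drop_drop]; convert hp using 2; omega⟩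

theorem pvOcc_nil {s w : List Char} {g : Int} {k : Nat}
    (h : ∀ i, k ≤ i → ¬ w <+: s.drop i) : pvOcc s w g k = [] := by
  unfold pvOcc
  rw [List.filter_eq_nil_iff.mpr, List.map_nil]
  intro i hi
  simp only [List.mem_range'_1] at hi
  simpa using h i hi.1

theorem pvOcc_cons {s w : List Char} {g : Int} {k j : Nat}
    (hkj : k ≤ j) (hjs : j ≤ s.length) (hj : w <+: s.drop j)
    (hmin : ∀ i, k ≤ i → i < j → ¬ w <+: s.drop i) :
    pvOcc s w g k = (g + (j : Int)) :: pvOcc s w g (j + 1) := by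
  unfold pvOcc
  have hsplit : List.range' k (s.length + 1 - k) =
      List.range' k (j - k) ++ List.range' j (s.length + 1 - j) := by
    have h1 := @List.range'_append k (j - k) (s.length + 1 - j) 1
    rw [one_mul, Nat.add_sub_cancel' hkj] at h1
    have h3 : s.length + 1 - k = (j - k) + (s.length + 1 - j) := by omega
    rw [h3, ← h1]
  rw [hsplit, List.filter_append, List.filter_eq_nil_iff.mpr, List.nil_append]
  · have h2 : s.length + 1 - j = (s.length - j) + 1 := by omega
    rw [h2, List.range'_succ, List.filter_cons]
    simp only [hj, decide_true, if_pos]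
    rw [List.map_cons]
    have h4 : s.length + 1 - (j + 1) = s.length - j := by omega
    rw [h4]
    rfl
  · intro i hi
    simp only [List.mem_range'_1] at hi
    simpa using hmin i hi.1 (by omega)

-- A's inner loop computes pvOcc
theorem findLoopA_eq_pvOcc (line word : String) (g : Int) (indx : Nat) :
    findLoopA line word g indx = pvOcc line.toList word.toList g indx := by
  rw [findLoopA]
  simp only [PySem.Str.findFrom_eq]
  by_cases hk : indx ≤ line.toList.length
  · by_cases h : PySem.Chars.findFrom line.toList word.toList (indx : Int) none > -1
    · rw [dif_pos h]
      obtain ⟨h1, h2, h3⟩ :=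
        PySem.Chars.findFrom_natCast_spec line.toList word.toList indx hk (by omega)
      set j := PySem.Chars.findFrom line.toList word.toList (indx : Int) none with hjdef
      have hjlen : j ≤ line.toList.length := by
        rw [hjdef, PySem.Chars.findFrom_natCast line.toList word.toList indx hk]
        have := PySem.Chars.find_le_length (line.toList.drop indx) word.toList
        simp only [List.length_drop] at this
        split <;> omega
      rw [findLoopA_eq_pvOcc line word g (j.toNat + 1),
        pvOcc_cons (by omega) (by omega) h2 h3]
      congr 2
      omega
    · rw [dif_neg h]
      have hne : PySem.Chars.findFrom line.toList word.toList (indx : Int) none = -1 := by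
        by_contra hc
        obtain ⟨h1, _, _⟩ :=
          PySem.Chars.findFrom_natCast_spec line.toList word.toList indx hk hc
        omega
      rw [(PySem.Chars.findFrom_natCast_eq_neg_one_iff line.toList word.toList indx hk)] at hne
      exact (pvOcc_nil (pvNoPrefix_of_not_infix hne)).symm
  · rw [dif_neg (by rw [pvFindFrom_past_len line.toList word.toList indx (by omega)]; omega)]
    unfold pvOcc
    have : line.toList.length + 1 - indx = 0 := by omega
    rw [this]
    simp
termination_by line.toList.length + 1 - indx
decreasing_by
  have := (PySem.Chars.findFrom_natCast_spec line.toList word.toList indx hk (by omega)).1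
  omega

-- B's inner loop computes pvOcc from 0
theorem scanLineB_eq_pvOcc (line word : String) (g : Int) :
    scanLineB line word g = pvOcc line.toList word.toList g 0 := by
  unfold scanLineB pvOcc
  rw [PySem.List.foldl_append_if, List.nil_append]
  have hlen : PySem.Str.len line + 1 = ((line.toList.length + 1 : Nat) : Int) := by
    simp [PySem.Str.len_eq]
  rw [hlen, PySem.List.pyRange_zero_natCast, List.filter_map, List.map_map]
  rw [List.range_eq_range', Nat.sub_zero]
  congr 1
  apply List.filter_congr
  intro i _
  simp only [Function.comp, PySem.Str.startswith_eq, PySem.Str.toList_slice,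
    PySem.Chars.slice_eq_listSlice, PySem.List.slice_from_natCast]
  by_cases hp : word.toList <+: List.drop i line.toList
  · simp [hp, PySem.Chars.startswith_iff]
  · simp only [hp, decide_false]
    exact Bool.not_eq_true _ ▸ (fun hc => hp ((PySem.Chars.startswith_iff _ _).mp hc))


theorem inner_eq (line word : String) (g : Int) :
    findLoopA line word g 0 = scanLineB line word g := by
  rw [findLoopA_eq_pvOcc, scanLineB_eq_pvOcc]

theorem outer_eq (word : String) (f : List String) (acc : List Int) (g : Int) :
    (f.foldl (fun st line => (st.1 ++ findLoopA line word st.2 0, st.2 + PySem.Str.len line)) (acc, g)).1 =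
    (f.foldl (fun st line => (st.1 ++ scanLineB line word st.2, st.2 + PySem.Str.len line)) (acc, g)).1 := by
  simp only [inner_eq]

-- ===== VERDICT (by name: the statement is the Claim_ definition above) =====
theorem find_world_spec : Claim_equal_find_world := by
  intro f word _
  unfold Spec_find_world find_world find_world_alt
  exact outer_eq word f [] 0
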